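-- pv_equiv track=rewrite | github.com/devYuMinKim/Coding_Test_with_JavaScript | 20220921/모범답안/20220921_09.js/differences.py | solution
-- ===== SOURCE A (Python) =====
-- def solution(N, K):
--     '''
--     :param N: int
--     :param K: int
--     :return: list
--     '''
--     if K == 0:
--         return [i for i in range(1, N+1)]
--     if N % (2*K) != 0:
--         return [-1]
--
--     result = [None]*(N+1)
--     for i in range(1, N+1):
--         if result[i] is None:
--             result[i] = i+K
--             result[i+K] = i
--
--     return result[1:]
-- ===== SOURCE B (Python) =====
-- def solution(N, K):
--     if K == 0:
--         return list(range(1, N + 1))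
--     if K < 0 or N % (2 * K) != 0:
--         return [-1]
--     # closed form: position of i inside its 2K-block decides its partner
--     return [i + K if (i - 1) % (2 * K) < K else i - K for i in range(1, N + 1)]
-- ===== Notes on version B (the rewrite author's own statement) =====
-- stated objective: simpler
-- what changed: Replaces A's mutable paired-fill loop (write slot i and its partner i+K, skipping already-filled slots) with an independent closed-form map: the position (i-1) % (2K) of i inside its 2K-sized block decides whether it maps to i+K or i-K; negative K is rejected with the same [-1] sentinel as an N that 2K cannot tile.
-- intended difference: For K<0 with 2K dividing N, A returns a list assembled through Python negative-index wraparound (e.g. solution(2,-1)=[2,1], with zeros, negatives and duplicates for larger |K|, or [] for N<=0); B returns the sentinel [-1] like for any other K that cannot pair 1..N, since no valid pairing exists for negative K and A's wrapped layout is an accident of its list mutation. — e.g. on solution(2, -1): A returns [2, 1], B returns [-1]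
import Mathlib
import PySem

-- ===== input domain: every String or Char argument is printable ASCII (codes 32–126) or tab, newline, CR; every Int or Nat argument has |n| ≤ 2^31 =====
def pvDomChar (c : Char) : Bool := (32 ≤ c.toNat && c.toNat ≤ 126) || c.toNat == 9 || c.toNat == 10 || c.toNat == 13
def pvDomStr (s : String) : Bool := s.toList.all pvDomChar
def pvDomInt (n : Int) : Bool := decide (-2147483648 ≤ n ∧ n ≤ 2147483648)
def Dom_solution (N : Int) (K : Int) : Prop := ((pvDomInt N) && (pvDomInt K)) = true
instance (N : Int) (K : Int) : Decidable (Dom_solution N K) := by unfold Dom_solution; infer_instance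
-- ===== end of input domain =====

-- B replaces A's mutable paired-fill loop by an independent per-index closed form (simpler);
-- for K<0 A's answer comes from negative-index wraparound, stated as the intended difference D_ below.

-- ===== PORT A =====
-- Python list item assignment xs[i] = v (negative i counts from the end; out of range would be
-- IndexError — never reached by A's loop, so the identity fallback is inert).
def pySetIdx (xs : List (Option Int)) (i : Int) (v : Option Int) : List (Option Int) :=
  let j := if i < 0 then i + xs.length else i
  if 0 ≤ j ∧ j < (xs.length : Int) then xs.set j.toNat v else xs

-- the body of A's for-loop
def stepA (K : Int) (r : List (Option Int)) (i : Int) : List (Option Int) :=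
  if PySem.List.pyGet? r i = some none then
    pySetIdx (pySetIdx r i (some (i + K))) (i + K) (some i)
  else r

def solution (N : Int) (K : Int) : List Int :=
  if K = 0 then PySem.List.pyRange 1 (N + 1) 1
  else if PySem.Int.mod N (2 * K) ≠ 0 then [-1]
  else
    let result : List (Option Int) := List.replicate (N + 1).toNat none
    let result := (PySem.List.pyRange 1 (N + 1) 1).foldl (stepA K) result
    -- result[1:]; every entry of the returned slice is filled (some), so getD's default is never used
    (PySem.List.slice result (some 1) none).map (fun (o : Option Int) => o.getD 0)

-- ===== PORT B =====
def solution_alt (N : Int) (K : Int) : List Int :=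
  if K = 0 then PySem.List.pyRange 1 (N + 1) 1
  else if K < 0 ∨ PySem.Int.mod N (2 * K) ≠ 0 then [-1]
  else (PySem.List.pyRange 1 (N + 1) 1).map (fun i =>
    if PySem.Int.mod (i - 1) (2 * K) < K then i + K else i - K)

-- ===== PRECONDITION & SPEC =====
-- For K<0 with 2K ∣ N, A returns a list assembled through Python negative-index wraparound
-- (e.g. solution(2,-1) = [2,1], with zeros/negatives/duplicates for larger |K|, [] for N ≤ 0);
-- B returns the sentinel [-1] like for any other K that cannot pair 1..N: no valid pairing
-- exists for negative K, and A's wrapped layout is an accident of its list mutation.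
def D_solution (N : Int) (K : Int) : Prop := K < 0 ∧ (2 * K) ∣ N
instance (N : Int) (K : Int) : Decidable (D_solution N K) := by unfold D_solution; infer_instance

def Spec_solution (N : Int) (K : Int) (out : List Int) : Prop :=
  ¬ D_solution N K → out = solution_alt N K
instance (N : Int) (K : Int) (out : List Int) : Decidable (Spec_solution N K out) := by
  unfold Spec_solution; infer_instance

def pvDiffWitness_solution : Int × Int := (2, -1)
def pvDiffWitnessOut_solution : (List Int) × (List Int) := ([2, 1], [-1])

-- ===== CLAIM (what is proved, stated in full; the proofs are below) =====
def Claim_unchanged_solution : Prop :=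
  ∀ (N : Int) (K : Int), Dom_solution N K → Spec_solution N K (solution N K)
def Claim_changed_solution : Prop :=
  Dom_solution (pvDiffWitness_solution.1) (pvDiffWitness_solution.2) ∧
  D_solution (pvDiffWitness_solution.1) (pvDiffWitness_solution.2) ∧
  solution (pvDiffWitness_solution.1) (pvDiffWitness_solution.2) = pvDiffWitnessOut_solution.1 ∧
  solution_alt (pvDiffWitness_solution.1) (pvDiffWitness_solution.2) = pvDiffWitnessOut_solution.2 ∧
  pvDiffWitnessOut_solution.1 ≠ pvDiffWitnessOut_solution.2
def Claim_exact_solution : Prop :=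
  ∀ (N : Int) (K : Int), Dom_solution N K → D_solution N K → solution N K ≠ solution_alt N K

-- ===== LEMMAS AND PROOFS =====

theorem length_pySetIdx (xs : List (Option Int)) (i : Int) (v : Option Int) :
    (pySetIdx xs i v).length = xs.length := by
  simp only [pySetIdx]
  split_ifs <;> simp

theorem length_stepA (K : Int) (r : List (Option Int)) (i : Int) :
    (stepA K r i).length = r.length := by
  unfold stepA
  split <;> simp [length_pySetIdx]

theorem length_foldl_stepA (K : Int) (l : List Int) (s : List (Option Int)) :
    (l.foldl (stepA K) s).length = s.length := by
  induction l generalizing s with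
  | nil => rfl
  | cons x xs ih => simp [List.foldl_cons, ih, length_stepA]

theorem pySetIdx_of_nonneg (xs : List (Option Int)) (i : Int) (v : Option Int)
    (h0 : 0 ≤ i) (h : i < (xs.length : Int)) :
    pySetIdx xs i v = xs.set i.toNat v := by
  simp only [pySetIdx]
  rw [if_neg (not_lt.mpr h0), if_pos ⟨h0, h⟩]

-- what slot j holds after A's loop has processed i = 1..t (for K > 0, 2K ∣ N)
def entryI (K t : Int) (j : Nat) : Option Int :=
  if 1 ≤ (j : Int) ∧ ((j : Int) ≤ t ∨ (K ≤ ((j : Int) - 1) % (2 * K) ∧ (j : Int) ≤ t + K)) then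
    some (if ((j : Int) - 1) % (2 * K) < K then (j : Int) + K else (j : Int) - K)
  else none

theorem loop_inv (N K : Int) (hK : 0 < K) (hd : (2 * K) ∣ N) (t : Nat) (ht : (t : Int) ≤ N) :
    ∀ j : Nat, j < (N + 1).toNat →
      (((PySem.List.pyRange 1 ((t : Int) + 1) 1).foldl (stepA K)
        (List.replicate (N + 1).toNat none))[j]? = some (entryI K (t : Int) j)) := by
  induction t with
  | zero =>
    intro j hj
    rw [PySem.List.pyRange_one_eq_nil (by omega)]
    simp only [List.foldl_nil, List.getElem?_replicate, if_pos hj]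
    unfold entryI
    rw [if_neg]
    rintro ⟨h1, h2 | ⟨hq, hjK⟩⟩
    · omega
    · have : ((j : Int) - 1) % (2 * K) = (j : Int) - 1 :=
        Int.emod_eq_of_lt (by omega) (by omega)
      omega
  | succ t ih =>
    intro j hj
    have ht' : (t : Int) ≤ N := by push_cast at ht; omega
    have hN1 : 0 ≤ N := by push_cast at ht; omega
    have hrange : PySem.List.pyRange 1 (((t + 1 : Nat) : Int) + 1) 1 =
        PySem.List.pyRange 1 ((t : Int) + 1) 1 ++ [(t : Int) + 1] := by
      push_cast
      exact PySem.List.pyRange_one_succ_right (by omega)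
    rw [hrange, List.foldl_append, List.foldl_cons, List.foldl_nil]
    set S := (PySem.List.pyRange 1 ((t : Int) + 1) 1).foldl (stepA K)
      (List.replicate (N + 1).toNat none) with hS
    have hlen : S.length = (N + 1).toNat := by
      rw [hS, length_foldl_stepA, List.length_replicate]
    have ht1 : (t : Int) + 1 ≤ N := by push_cast at ht; omega
    have htn : t + 1 < (N + 1).toNat := by omega
    -- the loop reads result[t+1]
    have hget : PySem.List.pyGet? S ((t : Int) + 1) = some (entryI K (t : Int) (t + 1)) := by
      have hc : ((t : Int) + 1) = ((t + 1 : Nat) : Int) := by push_cast; ring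
      rw [hc, PySem.List.pyGet?_natCast]
      rw [ih ht' (t + 1) htn]
    set p := (t : Int) % (2 * K) with hp
    have hp0 : 0 ≤ p := Int.emod_nonneg _ (by omega)
    have hp2 : p < 2 * K := Int.emod_lt_of_pos _ (by omega)
    have hqt1 : (((t + 1 : Nat) : Int) - 1) % (2 * K) = p := by
      rw [show ((t + 1 : Nat) : Int) - 1 = (t : Int) by push_cast; ring]
    have hKK : K % (2 * K) = K := Int.emod_eq_of_lt (by omega) (by omega)
    have hqpair : ((t : Int) + K) % (2 * K) = (p + K) % (2 * K) := by
      rw [Int.add_emod, hKK, hp]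
    have hentry : entryI K (t : Int) (t + 1) =
        if K ≤ p then some ((t : Int) + 1 - K) else none := by
      unfold entryI
      rw [hqt1]
      by_cases hpK : K ≤ p
      · rw [if_pos ⟨by push_cast; omega, Or.inr ⟨hpK, by push_cast; omega⟩⟩,
          if_pos hpK, if_neg (by omega)]
        push_cast; ring_nf
      · rw [if_neg, if_neg hpK]
        rintro ⟨-, h | ⟨hq, -⟩⟩
        · push_cast at h; omega
        · omega
    by_cases hpK : K ≤ p
    · -- result[t+1] already filled: the state is unchanged
      unfold stepA
      rw [hget, hentry, if_pos hpK, if_neg (by simp)]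
      rw [ih ht' j hj]
      -- entryI is unchanged from t to t+1 at every index still in range
      congr 1
      unfold entryI
      have hpair : (((j : Int)) = (t : Int) + 1 + K →
          ((j : Int) - 1) % (2 * K) = p - K) := by
        intro hje
        have : (j : Int) - 1 = (t : Int) + K := by omega
        rw [this, hqpair, show p + K = (p - K) + 2 * K * 1 by ring, Int.add_mul_emod_self_left]
        exact Int.emod_eq_of_lt (by omega) (by omega)
      set q := ((j : Int) - 1) % (2 * K) with hqd
      by_cases hje : (j : Int) = (t : Int) + 1 + K
      · have hq' : q = p - K := hpair hje
        push_cast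
        split_ifs <;> first | rfl | (exfalso; omega)
      · by_cases hje1 : (j : Int) = (t : Int) + 1
        · have hq' : q = p := by rw [hqd, hje1]; ring_nf; rw [← hqt1]; push_cast; ring_nf
          push_cast
          split_ifs <;> first | rfl | (exfalso; omega)
        · push_cast
          split_ifs <;> first | rfl | (exfalso; omega)
    · -- result[t+1] is None: fill t+1 and its partner t+1+K
      unfold stepA
      rw [hget, hentry, if_neg hpK, if_pos rfl]
      -- t+1+K stays in range because p < K and 2K ∣ N
      have hpartner : (t : Int) + 1 + K ≤ N := by
        by_contra hcon
        obtain ⟨m, hm⟩ := hd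
        have hd1 : 1 ≤ N - (t : Int) := by omega
        have hd2 : N - (t : Int) ≤ K := by omega
        have hN0 : N % (2 * K) = 0 := by rw [hm, Int.mul_emod_right]
        have h1 : (↑t - N) % (2 * K) = p := by
          rw [Int.sub_emod, hN0, sub_zero, ← hp, Int.emod_emod_of_dvd _ dvd_rfl]
        have h2 : (↑t - N) % (2 * K) = ↑t - N + 2 * K := by
          have h2a := Int.add_mul_emod_self_left (a := (↑t : Int) - N + 2 * K) (b := 2 * K) (c := -1)
          rw [show (↑t : Int) - N + 2 * K + 2 * K * (-1) = ↑t - N by ring] at h2a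
          rw [h2a]
          exact Int.emod_eq_of_lt (by omega) (by omega)
        omega
      have hcast1 : ((t : Int) + 1).toNat = t + 1 := by omega
      rw [pySetIdx_of_nonneg S _ _ (by omega) (by rw [hlen]; omega)]
      rw [pySetIdx_of_nonneg _ _ _ (by omega) (by rw [List.length_set, hlen]; omega)]
      rw [hcast1]
      set b : Nat := ((t : Int) + 1 + K).toNat with hbdef
      have hb : (b : Int) = (t : Int) + 1 + K := by omega
      have hblt : b < (N + 1).toNat := by omega
      have hqb : ((b : Int) - 1) % (2 * K) = p + K := by
        have : (b : Int) - 1 = (t : Int) + K := by omega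
        rw [this, hqpair]
        exact Int.emod_eq_of_lt (by omega) (by omega)
      rw [List.getElem?_set, List.getElem?_set]
      simp only [List.length_set, hlen]
      by_cases hjb : b = j
      · rw [if_pos hjb, if_pos (by omega)]
        unfold entryI
        rw [← hjb, hqb]
        rw [if_pos ⟨by omega, Or.inr ⟨by omega, by push_cast; omega⟩⟩, if_neg (by omega)]
        simp only [Option.some.injEq]
        omega
      · rw [if_neg hjb]
        by_cases hja : t + 1 = j
        · rw [if_pos hja, if_pos (by omega)]
          unfold entryI
          rw [← hja]
          rw [hqt1]
          rw [if_pos ⟨by push_cast; omega, Or.inl (by push_cast; omega)⟩, if_pos (by omega)]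
          simp only [Option.some.injEq]
          omega
        · rw [if_neg hja, ih ht' j hj]
          congr 1
          unfold entryI
          have hjb' : (j : Int) ≠ (t : Int) + 1 + K := by omega
          have hja' : (j : Int) ≠ (t : Int) + 1 := by omega
          set q := ((j : Int) - 1) % (2 * K) with hqd
          push_cast
          split_ifs <;> first | rfl | (exfalso; omega)

theorem main_case (N K : Int) (hK : 0 < K) (hN : 0 < N) (hd : (2 * K) ∣ N) :
    solution N K = solution_alt N K := by
  have hK0 : ¬ K = 0 := by omega
  have hm : PySem.Int.mod N (2 * K) = 0 := (PySem.Int.mod_eq_zero_iff_dvd _ _).mpr hd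
  unfold solution solution_alt
  rw [if_neg hK0, if_neg hK0, hm, if_neg (by simp), if_neg (by exact not_or.mpr ⟨by omega, by simp⟩)]
  dsimp only
  rw [PySem.List.slice_from _ (by omega : (0:Int) ≤ 1)]
  simp only [Int.toNat_one]
  have hcastN : ((N.toNat : Int)) = N := Int.toNat_of_nonneg hN.le
  have key := loop_inv N K hK hd N.toNat (by omega)
  rw [hcastN] at key
  have hlen : ((PySem.List.pyRange 1 (N + 1) 1).foldl (stepA K)
      (List.replicate (N + 1).toNat none)).length = (N + 1).toNat := by
    rw [length_foldl_stepA, List.length_replicate]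
  apply List.ext_getElem?
  intro i
  rw [List.getElem?_map, List.getElem?_map, List.getElem?_drop,
    PySem.List.getElem?_pyRange_one]
  by_cases hi : i < N.toNat
  · rw [key (1 + i) (by omega), if_pos (by omega)]
    unfold entryI
    rw [if_pos ⟨by omega, Or.inl (by omega)⟩]
    simp only [Option.map_some, Option.getD_some, Option.some.injEq]
    rw [PySem.Int.mod_eq_emod_of_pos (by omega)]
    have : ((1 : Int) + ↑i) - 1 = ((1 + i : Nat) : Int) - 1 := by push_cast; ring
    rw [← this]
    split_ifs <;> push_cast <;> ring
  · rw [if_neg (by omega)]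
    have : ((PySem.List.pyRange 1 (N + 1) 1).foldl (stepA K)
        (List.replicate (N + 1).toNat none))[1 + i]? = none := by
      rw [List.getElem?_eq_none_iff, hlen]
      omega
    rw [this]
    rfl

-- ===== VERDICT (by name: the statement is the Claim_ definition above) =====
theorem solution_spec : Claim_unchanged_solution := by
  intro N K _hDom hnD
  by_cases hK0 : K = 0
  · unfold solution solution_alt
    rw [if_pos hK0, if_pos hK0]
  · by_cases hm : PySem.Int.mod N (2 * K) = 0
    · have hd : (2 * K) ∣ N := (PySem.Int.mod_eq_zero_iff_dvd _ _).mp hm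
      have hK : 0 < K := by
        rcases lt_trichotomy K 0 with h | h | h
        · exact absurd ⟨h, hd⟩ hnD
        · exact absurd h hK0
        · exact h
      by_cases hN : 0 < N
      · exact main_case N K hK hN hd
      · -- N ≤ 0: the loop body never runs, both sides are []
        have hnil : PySem.List.pyRange 1 (N + 1) 1 = [] :=
          PySem.List.pyRange_one_eq_nil (by omega)
        unfold solution solution_alt
        rw [if_neg hK0, if_neg hK0, hm, if_neg (by simp),
          if_neg (by exact not_or.mpr ⟨by omega, by simp⟩), hnil]
        dsimp only
        simp only [List.foldl_nil, List.map_nil]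
        rw [PySem.List.slice_from _ (by omega : (0:Int) ≤ 1)]
        have : (N + 1).toNat ≤ 1 := by omega
        interval_cases h : (N + 1).toNat <;> simp
    · unfold solution solution_alt
      rw [if_neg hK0, if_neg hK0, if_pos hm, if_pos (Or.inr hm)]

-- inside D_ the two programs differ everywhere: B is the singleton [-1] while A's result,
-- the slice result[1:] of a list of length N+1, never has length 1 when 2K ∣ N with K < 0
theorem solution_changed : Claim_changed_solution := by
  unfold Claim_changed_solution; decide

theorem solution_tight : Claim_exact_solution := by
  intro N K _hDom hDcond heq
  obtain ⟨hK, hd⟩ := hDcond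
  have hK0 : ¬ K = 0 := by omega
  have hm0 : PySem.Int.mod N (2 * K) = 0 := (PySem.Int.mod_eq_zero_iff_dvd _ _).mpr hd
  have hB : solution_alt N K = [-1] := by
    unfold solution_alt
    rw [if_neg hK0, if_pos (Or.inl hK)]
  rw [hB] at heq
  have hlenA : (solution N K).length = (N + 1).toNat - 1 := by
    unfold solution
    rw [if_neg hK0, hm0, if_neg (by simp)]
    dsimp only
    rw [PySem.List.slice_from _ (by omega : (0:Int) ≤ 1)]
    simp only [Int.toNat_one, List.length_map, List.length_drop, length_foldl_stepA,
      List.length_replicate]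
  rw [heq] at hlenA
  have hN1 : N = 1 := by
    simp only [List.length_cons, List.length_nil] at hlenA
    omega
  obtain ⟨c, hc⟩ := hd
  rw [hN1] at hc
  have : 2 * (K * c) = 1 := by linarith
  omega
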